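-- pv_equiv track=rewrite | github.com/KausikN/MTech_LARP_Files | Assignments/Assignment 6/Codes/Prob.py | SumCombinations
-- ===== SOURCE A (Python) =====
-- def SumCombinations(n, allowed_vals=[1, 2, 3, 4, 5, 6], max_len=3):
--     '''
--     All combinations of numbers summing up to n
--     '''
--     if max_len <= 1:
--         return []
--     # Initialize
--     combinations = []
--     # Loop through all numbers
--     for i in allowed_vals:
--         rem = n - i
--         if rem in allowed_vals:
--             combinations.append([i, rem])
--         if rem > min(allowed_vals):
--             subCombinations = SumCombinations(rem, allowed_vals, max_len-1)
--             for subComb in subCombinations: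
--                 combinations.append([i] + subComb)
--
--     return combinations
-- ===== SOURCE B (Python) =====
-- def SumCombinations(n, allowed_vals=[1, 2, 3, 4, 5, 6], max_len=3):
--     '''
--     All combinations of numbers summing up to n (memoized top-down DP)
--     '''
--     if not allowed_vals:
--         return []
--     mn = min(allowed_vals)
--     memo = {}
--
--     def go(total, length):
--         if length <= 1:
--             return []
--         key = (total, length)
--         if key in memo:
--             return memo[key]
--         combs = []
--         for i in allowed_vals:
--             rem = total - i
--             if rem in allowed_vals:
--                 combs.append([i, rem])
--             if rem > mn:
--                 for sub in go(rem, length - 1):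
--                     combs.append([i] + sub)
--         memo[key] = combs
--         return combs
--
--     return go(n, max_len)
-- ===== Notes on version B (the rewrite author's own statement) =====
-- stated objective: alternative
-- what changed: B replaces the naive recursion with a top-down dynamic program: results are memoized in a dict keyed by (remaining sum, remaining length) and min(allowed_vals) is hoisted out of the loop, while keeping the exact enumeration order.
-- outside the precondition, e.g. on SumCombinations(1, [0], 9500): A returns [], B returns []
import Mathlib
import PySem

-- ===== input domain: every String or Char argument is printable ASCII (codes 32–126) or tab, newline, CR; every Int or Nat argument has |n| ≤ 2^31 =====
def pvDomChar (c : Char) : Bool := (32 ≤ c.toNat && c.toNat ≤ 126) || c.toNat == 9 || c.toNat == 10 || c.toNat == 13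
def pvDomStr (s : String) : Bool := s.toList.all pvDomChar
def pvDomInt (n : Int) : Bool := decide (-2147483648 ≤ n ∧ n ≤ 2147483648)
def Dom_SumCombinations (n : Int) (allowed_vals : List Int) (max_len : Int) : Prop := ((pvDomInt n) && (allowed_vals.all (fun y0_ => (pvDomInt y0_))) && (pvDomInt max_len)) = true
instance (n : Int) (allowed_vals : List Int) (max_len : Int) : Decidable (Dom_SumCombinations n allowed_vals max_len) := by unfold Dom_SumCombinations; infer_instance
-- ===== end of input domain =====

-- B memoizes the recursion on (remaining sum, remaining length) and hoists min(allowed_vals)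
-- out of the loop; same enumeration order. Objective: alternative (naive recursion vs top-down DP).

-- ===== PORT A =====
-- the body of A's for-loop, as structural recursion over the remaining allowed values;
-- `sub` is the recursive call A makes with max_len-1
def loopA (sub : Int → List (List Int)) (n : Int) (allowed : List Int) : List Int → List (List Int)
  | [] => []
  | i :: rest =>
    let rem := n - i
    ((if rem ∈ allowed then [[i, rem]] else []) ++
      (match PySem.List.min? allowed (fun x => x) with
        | none => []                      -- unreachable: the loop runs only on a nonempty list
        | some m => if m < rem then (sub rem).map (fun s => i :: s) else [])) ++
    loopA sub n allowed rest

-- recursion on fuel = max_len.toNat (Python recurses on the int max_len, decreasing to the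
-- base case max_len <= 1; toNat is exact on that control flow)
def goA (fuel : Nat) (n : Int) (allowed : List Int) : List (List Int) :=
  if _h : fuel ≤ 1 then []
  else loopA (fun rem => goA (fuel - 1) rem allowed) n allowed allowed
termination_by fuel
decreasing_by omega

def SumCombinations (n : Int) (allowed_vals : List Int) (max_len : Int) : List (List Int) :=
  goA max_len.toNat n allowed_vals

-- ===== PORT B =====
-- B's memo dict, keyed by (remaining sum, remaining length)
def loopB (sub : Int → PySem.Dict (Int × Nat) (List (List Int)) → List (List Int) × PySem.Dict (Int × Nat) (List (List Int)))
    (n : Int) (allowed : List Int) (mn : Int) :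
    List Int → PySem.Dict (Int × Nat) (List (List Int)) → List (List Int) × PySem.Dict (Int × Nat) (List (List Int))
  | [], c => ([], c)
  | i :: rest, c =>
    let rem := n - i
    let head := if rem ∈ allowed then [[i, rem]] else []
    let p := if mn < rem then
               (let q := sub rem c; (q.1.map (fun s => i :: s), q.2))
             else ([], c)
    let t := loopB sub n allowed mn rest p.2
    (head ++ p.1 ++ t.1, t.2)

def goB (allowed : List Int) (mn : Int) (fuel : Nat) (n : Int)
    (c : PySem.Dict (Int × Nat) (List (List Int))) :
    List (List Int) × PySem.Dict (Int × Nat) (List (List Int)) :=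
  if _h : fuel ≤ 1 then ([], c)
  else
    match c.get? (n, fuel) with
    | some v => (v, c)
    | none =>
      let r := loopB (fun rem c => goB allowed mn (fuel - 1) rem c) n allowed mn allowed c
      (r.1, r.2.insert (n, fuel) r.1)
termination_by fuel
decreasing_by omega

def SumCombinations_alt (n : Int) (allowed_vals : List Int) (max_len : Int) : List (List Int) :=
  match PySem.List.min? allowed_vals (fun x => x) with
  | none => []                            -- B: `if not allowed_vals: return []`
  | some mn => (goB allowed_vals mn max_len.toNat n PySem.Dict.empty).1

-- ===== PRECONDITION & SPEC =====
-- Pre_ excludes exactly the deep-recursion region where CPython's recursion limit makes A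
-- raise RecursionError: the recursion descends one level per unit of max_len and, when every
-- allowed value is ≥ mn := min(allowed_vals) ≥ 1, also consumes at least mn of n per level,
-- so a raise needs max_len beyond the limit AND a descent that can actually run that deep
-- (some allowed value ≤ 0, or n ≥ limit·mn) AND a first step that descends at all
-- (some i with n - i > mn). The margin (9000 vs the runner's limit 10000) leaves a thin
-- sliver of still-returning inputs excluded (see the cite in claim.json); B (also recursive)
-- raises there too, so there is no Raises_ block.
def preDeepOk (n : Int) (allowed_vals : List Int) (max_len : Int) : Bool :=
  match PySem.List.min? allowed_vals (fun x => x) with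
  | none => true
  | some mn =>
    decide (max_len ≤ 9000)
    || (decide (1 ≤ mn) && decide (n < 9000 * mn))
    || allowed_vals.all (fun i => decide (n - i ≤ mn))
def Pre_SumCombinations (n : Int) (allowed_vals : List Int) (max_len : Int) : Prop :=
  preDeepOk n allowed_vals max_len = true
instance (n : Int) (allowed_vals : List Int) (max_len : Int) : Decidable (Pre_SumCombinations n allowed_vals max_len) := by unfold Pre_SumCombinations; infer_instance
def pvWitness_SumCombinations : Int × List Int × Int := (7, [1, 2, 3], 3)

def Spec_SumCombinations (n : Int) (allowed_vals : List Int) (max_len : Int) (out : List (List Int)) : Prop := out = SumCombinations_alt n allowed_vals max_len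
instance (n : Int) (allowed_vals : List Int) (max_len : Int) (out : List (List Int)) : Decidable (Spec_SumCombinations n allowed_vals max_len out) := by unfold Spec_SumCombinations; infer_instance

-- ===== CLAIM (what is proved, stated in full; the proofs are below) =====
def Claim_equal_SumCombinations : Prop := ∀ (n : Int) (allowed_vals : List Int) (max_len : Int), Dom_SumCombinations n allowed_vals max_len → Pre_SumCombinations n allowed_vals max_len → Spec_SumCombinations n allowed_vals max_len (SumCombinations n allowed_vals max_len)

-- ===== LEMMAS AND PROOFS =====

-- cache invariant: every stored value is the uncached recursion's value
def CacheInv (allowed : List Int) (c : PySem.Dict (Int × Nat) (List (List Int))) : Prop :=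
  ∀ m f v, c.get? (m, f) = some v → v = goA f m allowed

theorem loopB_correct (allowed : List Int) (mn : Int)
    (hmn : PySem.List.min? allowed (fun x => x) = some mn)
    (sub : Int → List (List Int))
    (sub' : Int → PySem.Dict (Int × Nat) (List (List Int)) → List (List Int) × PySem.Dict (Int × Nat) (List (List Int)))
    (hsub : ∀ rem c, CacheInv allowed c → (sub' rem c).1 = sub rem ∧ CacheInv allowed (sub' rem c).2)
    (n : Int) :
    ∀ (l : List Int) (c : PySem.Dict (Int × Nat) (List (List Int))), CacheInv allowed c →
      (loopB sub' n allowed mn l c).1 = loopA sub n allowed l ∧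
      CacheInv allowed (loopB sub' n allowed mn l c).2 := by
  intro l
  induction l with
  | nil => intro c hc; simp [loopA, loopB, hc]
  | cons i rest ih =>
    intro c hc
    have hmid : (if mn < n - i then
          (let q := sub' (n - i) c; (q.1.map (fun s => i :: s), q.2))
        else ([], c)).1
        = (match PySem.List.min? allowed (fun x => x) with
            | none => []
            | some m => if m < n - i then (sub (n - i)).map (fun s => i :: s) else []) ∧
        CacheInv allowed (if mn < n - i then
          (let q := sub' (n - i) c; (q.1.map (fun s => i :: s), q.2))
        else ([], c)).2 := by
      rw [hmn]
      by_cases h : mn < n - i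
      · simp only [h, if_pos]
        obtain ⟨h1, h2⟩ := hsub (n - i) c hc
        exact ⟨by rw [h1], h2⟩
      · simp [h, hc]
    obtain ⟨hm1, hm2⟩ := hmid
    obtain ⟨ht1, ht2⟩ := ih _ hm2
    constructor
    · simp only [loopB, loopA]
      rw [hm1, ht1]
    · simpa only [loopB] using ht2

theorem goB_correct (allowed : List Int) (mn : Int)
    (hmn : PySem.List.min? allowed (fun x => x) = some mn) :
    ∀ (fuel : Nat) (n : Int) (c : PySem.Dict (Int × Nat) (List (List Int))), CacheInv allowed c →
      (goB allowed mn fuel n c).1 = goA fuel n allowed ∧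
      CacheInv allowed (goB allowed mn fuel n c).2 := by
  intro fuel
  induction fuel using Nat.strong_induction_on with
  | _ fuel ih =>
    intro n c hc
    by_cases hf : fuel ≤ 1
    · rw [goB, goA]; simp [hf, hc]
    · rw [goB, goA]
      simp only [hf, dite_false]
      cases hg : c.get? (n, fuel) with
      | some v =>
        refine ⟨?_, ?_⟩
        · have := hc n fuel v hg
          rw [this, goA]; simp [hf]
        · exact hc
      | none =>
        have hsub : ∀ rem c', CacheInv allowed c' →
            ((fun rem c => goB allowed mn (fuel - 1) rem c) rem c').1 = (fun rem => goA (fuel - 1) rem allowed) rem ∧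
            CacheInv allowed ((fun rem c => goB allowed mn (fuel - 1) rem c) rem c').2 := by
          intro rem c' hc'
          exact ih (fuel - 1) (by omega) rem c' hc'
        obtain ⟨h1, h2⟩ := loopB_correct allowed mn hmn
          (fun rem => goA (fuel - 1) rem allowed)
          (fun rem c => goB allowed mn (fuel - 1) rem c) hsub n allowed c hc
        refine ⟨h1, ?_⟩
        intro m f v hv
        rw [PySem.Dict.get?_insert] at hv
        by_cases hk : (m, f) = (n, fuel)
        · rw [if_pos hk] at hv
          obtain ⟨rfl, rfl⟩ := Prod.mk.injEq .. ▸ hk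
          cases hv
          rw [h1, goA]; simp [hf]
        · rw [if_neg hk] at hv
          exact h2 m f v hv

theorem goA_nil (fuel : Nat) (n : Int) : goA fuel n [] = [] := by
  rw [goA]
  by_cases hf : fuel ≤ 1 <;> simp [hf, loopA]

-- ===== VERDICT (by name: the statement is the Claim_ definition above) =====
theorem SumCombinations_spec : Claim_equal_SumCombinations := by
  intro n allowed_vals max_len _ _
  unfold Spec_SumCombinations SumCombinations SumCombinations_alt
  cases hmn : PySem.List.min? allowed_vals (fun x => x) with
  | none =>
    rw [PySem.List.min?_eq_none_iff] at hmn
    subst hmn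
    exact goA_nil _ _
  | some mn =>
    have hempty : CacheInv allowed_vals PySem.Dict.empty := by
      intro m f v hv
      simp [PySem.Dict.get?_empty] at hv
    exact ((goB_correct allowed_vals mn hmn max_len.toNat n PySem.Dict.empty hempty).1).symm
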